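-- pv_equiv track=rewrite | github.com/wl00037/Algorithm-notes | LeetCode/双指针类型题目/双指针-滑动窗口/leetcode-76.最小覆盖子串(难).py | IsInclude
-- ===== SOURCE A (Python) =====
-- import collections
--
-- def IsInclude(current_SubStrig,t):      #   是否包含了子串，包含则返回True，否则就返回False
--     #   用统计来判断current_SubStrig中是否包含了所有t内的字符
--     t_counter_items = collections.Counter(t)
--     current_SubStrig_items = collections.Counter(current_SubStrig)
--     for key,count in t_counter_items.items():
--         if key in current_SubStrig_items.keys() and t_counter_items[key] <= current_SubStrig_items[key]:
--             continue
--         else: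
--             return False
--     return True
-- ===== SOURCE B (Python) =====
-- import collections
--
-- def IsInclude(current_SubStrig, t):
--     # Single scan over current_SubStrig maintaining a running deficit table for t.
--     need = collections.Counter(t)
--     for c in current_SubStrig:
--         if c in need:
--             need[c] -= 1
--     return all(v <= 0 for v in need.values())
-- ===== Notes on version B (the rewrite author's own statement) =====
-- stated objective: idiomatic
-- what changed: B keeps only one Counter (the needs of t) and decrements it while scanning current_SubStrig once, then checks all deficits are <= 0, instead of building a second Counter of the candidate string and comparing the two tallies key by key with an early return.
import Mathlib
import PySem

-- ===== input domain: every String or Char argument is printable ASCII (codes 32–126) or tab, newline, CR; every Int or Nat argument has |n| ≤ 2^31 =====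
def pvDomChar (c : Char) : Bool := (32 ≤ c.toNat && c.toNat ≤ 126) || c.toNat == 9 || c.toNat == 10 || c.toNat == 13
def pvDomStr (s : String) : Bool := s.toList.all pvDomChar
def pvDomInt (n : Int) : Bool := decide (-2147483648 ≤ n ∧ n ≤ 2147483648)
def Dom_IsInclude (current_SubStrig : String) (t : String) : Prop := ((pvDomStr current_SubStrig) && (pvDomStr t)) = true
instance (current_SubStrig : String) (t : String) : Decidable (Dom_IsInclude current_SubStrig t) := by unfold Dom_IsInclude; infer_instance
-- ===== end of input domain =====

-- B maintains one running deficit Counter while scanning the candidate once, instead of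
-- building a second Counter and comparing the tallies key by key (objective: idiomatic).

-- ===== PORT A =====
-- A: build Counter(t) and Counter(current_SubStrig), then loop over t's items with early return False.
def IsInclude (current_SubStrig : String) (t : String) : Bool :=
  let t_counter_items : PySem.Dict Char Int := PySem.Dict.counter t.toList
  let current_SubStrig_items : PySem.Dict Char Int := PySem.Dict.counter current_SubStrig.toList
  t_counter_items.items.all (fun p =>
    current_SubStrig_items.contains p.1 &&
      decide (t_counter_items.getD p.1 0 ≤ current_SubStrig_items.getD p.1 0))

-- ===== PORT B =====
-- B: need = Counter(t); one scan over current_SubStrig decrementing need[c] for keys of need;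
-- then all(v <= 0 for v in need.values()).
def IsInclude_alt (current_SubStrig : String) (t : String) : Bool :=
  let need : PySem.Dict Char Int :=
    current_SubStrig.toList.foldl
      (fun d c => if d.contains c then d.modify c 0 (· - 1) else d)
      (PySem.Dict.counter t.toList)
  need.values.all (fun v => decide (v ≤ 0))

-- ===== PRECONDITION & SPEC =====
def Spec_IsInclude (current_SubStrig : String) (t : String) (out : Bool) : Prop := out = IsInclude_alt current_SubStrig t
instance (current_SubStrig : String) (t : String) (out : Bool) : Decidable (Spec_IsInclude current_SubStrig t out) := by unfold Spec_IsInclude; infer_instance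

-- ===== CLAIM (what is proved, stated in full; the proofs are below) =====
def Claim_equal_IsInclude : Prop := ∀ (current_SubStrig : String) (t : String), Dom_IsInclude current_SubStrig t → Spec_IsInclude current_SubStrig t (IsInclude current_SubStrig t)

-- ===== LEMMAS AND PROOFS =====

-- B's guarded decrement loop leaves the key set untouched and subtracts the count of
-- each existing key from its stored value.
theorem foldl_dec_keys (l : List Char) (d : PySem.Dict Char Int) :
    (l.foldl (fun d c => if d.contains c then d.modify c 0 (· - 1) else d) d).keys = d.keys := by
  induction l generalizing d with
  | nil => rfl
  | cons c l ih =>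
    simp only [List.foldl_cons]
    by_cases hc : d.contains c = true
    · rw [if_pos hc, ih, PySem.Dict.keys_modify, PySem.Dict.keys_insert_of_contains]
      simpa [PySem.Dict.contains_modify] using hc
    · rw [if_neg hc, ih]

theorem foldl_dec_getD (l : List Char) (d : PySem.Dict Char Int) (k : Char)
    (hk : d.contains k = true) :
    (l.foldl (fun d c => if d.contains c then d.modify c 0 (· - 1) else d) d).getD k 0
      = d.getD k 0 - l.count k := by
  induction l generalizing d with
  | nil => simp
  | cons c l ih =>
    simp only [List.foldl_cons]
    by_cases hc : d.contains c = true
    · rw [if_pos hc]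
      have hk' : (d.modify c 0 (· - 1)).contains k = true := by
        simpa [PySem.Dict.contains_modify] using Or.inr hk
      rw [ih _ hk', PySem.Dict.getD_modify]
      rcases eq_or_ne k c with rfl | h
      · simp only [List.count_cons_self]
        push_cast; ring
      · have h' : c ≠ k := Ne.symm h
        simp [h', h]
    · rw [if_neg hc, ih _ hk]
      have h' : c ≠ k := fun e => hc (e ▸ hk)
      simp [h']

theorem IsInclude_spec_aux (s t : String) : IsInclude s t = IsInclude_alt s t := by
  unfold IsInclude IsInclude_alt
  dsimp only
  rw [PySem.Dict.values_eq_map_keys _ (by rw [foldl_dec_keys]; exact PySem.Dict.nodup_keys_counter _) 0]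
  rw [List.all_map, foldl_dec_keys, PySem.Dict.keys_counter, PySem.Dict.items_counter, List.all_map]
  rw [Bool.eq_iff_iff]
  simp only [List.all_eq_true]
  apply forall_congr'
  intro k
  apply imp_congr_right
  intro hk
  have hmem : k ∈ t.toList := (PySem.Set.mem_ofList _ _).1 hk
  have hcont : (PySem.Dict.counter t.toList).contains k = true := by
    rw [PySem.Dict.contains_counter]; exact List.elem_eq_true_of_mem hmem
  simp only [Function.comp]
  simp only [foldl_dec_getD _ _ _ hcont]
  simp only [PySem.Dict.getD_counter, PySem.Dict.contains_counter,
    Bool.and_eq_true, decide_eq_true_eq, List.contains_eq_mem]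
  have hpos : 0 < t.toList.count k := List.count_pos_iff.2 hmem
  constructor
  · rintro ⟨_, hle⟩; omega
  · intro hle
    have hle' : (t.toList.count k : Int) ≤ s.toList.count k := by omega
    have hks : k ∈ s.toList := List.count_pos_iff.1 (by omega)
    exact ⟨hks, hle'⟩

-- ===== VERDICT (by name: the statement is the Claim_ definition above) =====
theorem IsInclude_spec : Claim_equal_IsInclude := by
  intro s t _
  exact IsInclude_spec_aux s t
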